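-- pv_equiv track=rewrite | github.com/vsyntot/skillra_hse_pda | parser/hh_scraper.py | description_stats
-- ===== SOURCE A (Python) =====
-- from typing import Dict, List, Optional, Sequence, Tuple
--
-- def description_stats(description: str) -> Tuple[int, int, int, int]:
--     desc_len_chars = len(description)
--     desc_len_words = len(description.split()) if description else 0
--     lines = description.splitlines()
--     bullets = sum(1 for line in lines if line.strip().startswith(("-", "*", "•")))
--     paragraphs = 0
--     prev_blank = True
--     for line in lines:
--         if line.strip():
--             if prev_blank:
--                 paragraphs += 1
--             prev_blank = False
--         else:
--             prev_blank = True
--     if not paragraphs and description: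
--         paragraphs = 1
--     return desc_len_chars, desc_len_words, bullets, paragraphs
-- ===== SOURCE B (Python) =====
-- def description_stats(description):
--     if not description:
--         return 0, 0, 0, 0
--     # segment the lines into maximal runs of non-blank lines (paragraph blocks)
--     lines = description.splitlines()
--     n = len(lines)
--     blocks = []
--     i = 0
--     while i < n:
--         if not lines[i].strip():
--             i += 1
--             continue
--         j = i
--         while j < n and lines[j].strip():
--             j += 1
--         blocks.append(lines[i:j])
--         i = j
--     paragraphs = len(blocks) or 1
--     # blank lines can never start with a bullet, so counting inside blocks is exact
--     bullets = sum(1 for block in blocks for line in block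
--                   if line.strip().startswith(("-", "*", "\u2022")))
--     return len(description), len(description.split()), bullets, paragraphs
-- ===== Notes on version B (the rewrite author's own statement) =====
-- stated objective: alternative
-- what changed: B segments the lines into explicit paragraph blocks (maximal runs of non-blank lines, found by two-pointer scanning) and reads paragraphs off as the number of blocks and bullets as a count inside the blocks, replacing A's prev_blank state machine and its separate whole-line bullet scan; the empty string is an early return.
import Mathlib
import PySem

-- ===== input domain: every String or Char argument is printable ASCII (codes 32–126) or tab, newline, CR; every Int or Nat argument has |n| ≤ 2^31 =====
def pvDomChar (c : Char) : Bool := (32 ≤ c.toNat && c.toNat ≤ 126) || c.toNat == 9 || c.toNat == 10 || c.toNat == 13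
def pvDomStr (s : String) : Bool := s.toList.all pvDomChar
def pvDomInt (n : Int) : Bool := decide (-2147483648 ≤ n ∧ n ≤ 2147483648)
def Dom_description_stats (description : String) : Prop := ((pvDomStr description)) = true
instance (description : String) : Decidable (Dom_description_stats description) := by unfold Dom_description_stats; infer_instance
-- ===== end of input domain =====

-- B segments the lines into explicit paragraph blocks (maximal non-blank runs) and
-- derives paragraphs and bullets from the blocks, replacing A's prev_blank state machine.

-- ===== PORT A =====
def description_stats (description : String) : Int × Int × Int × Int :=
  let descLenChars : Int := PySem.Str.len description
  let descLenWords : Int := if description ≠ "" then ((PySem.Str.split₀ description).length : Int) else 0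
  let lines := PySem.Str.splitlines description
  let bullets : Int := lines.foldl (fun acc line =>
      let s := PySem.Str.strip line
      if PySem.Str.startswith s "-" || PySem.Str.startswith s "*" || PySem.Str.startswith s "•"
      then acc + 1 else acc) 0
  let pp := lines.foldl (fun (st : Int × Bool) line =>
      if PySem.Str.strip line ≠ "" then
        (if st.2 then st.1 + 1 else st.1, false)
      else (st.1, true)) (0, true)
  let paragraphs : Int := if pp.1 = 0 ∧ description ≠ "" then 1 else pp.1
  (descLenChars, descLenWords, bullets, paragraphs)

-- ===== PORT B =====
-- line is non-blank
def pvNB (l : String) : Bool := PySem.Str.strip l != ""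

-- stripped line starts with a bullet marker
def pvBullet (l : String) : Bool :=
  let s := PySem.Str.strip l
  PySem.Str.startswith s "-" || PySem.Str.startswith s "*" || PySem.Str.startswith s "•"

-- the two-pointer while loop of Source B: maximal runs of non-blank lines
def pvBlocks : List String → List (List String)
  | [] => []
  | l :: ls =>
    if pvNB l then (l :: ls.takeWhile pvNB) :: pvBlocks (ls.dropWhile pvNB)
    else pvBlocks ls
termination_by ls => ls.length
decreasing_by
  · have := List.length_dropWhile_le (p := pvNB) (l := ls); simp; omega
  · simp

def description_stats_alt (description : String) : Int × Int × Int × Int :=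
  if description = "" then (0, 0, 0, 0) else
  let lines := PySem.Str.splitlines description
  let blocks := pvBlocks lines
  let paragraphs : Int := if blocks.length = 0 then 1 else (blocks.length : Int)
  let bullets : Int := ((blocks.flatten).filter pvBullet).length
  (PySem.Str.len description, ((PySem.Str.split₀ description).length : Int), bullets, paragraphs)

-- ===== PRECONDITION & SPEC =====
def Spec_description_stats (description : String) (out : Int × Int × Int × Int) : Prop := out = description_stats_alt description
instance (description : String) (out : Int × Int × Int × Int) : Decidable (Spec_description_stats description out) := by unfold Spec_description_stats; infer_instance

-- ===== CLAIM (what is proved, stated in full; the proofs are below) =====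
def Claim_equal_description_stats : Prop := ∀ (description : String), Dom_description_stats description → Spec_description_stats description (description_stats description)

-- ===== LEMMAS AND PROOFS =====

-- A's prev_blank fold equals the number of B's blocks (both start states)
theorem para_fold_eq (ls : List String) : ∀ (n : Int),
    (ls.foldl (fun (st : Int × Bool) line =>
        if PySem.Str.strip line ≠ "" then (if st.2 then st.1 + 1 else st.1, false)
        else (st.1, true)) (n, true)).1 = n + (pvBlocks ls).length
    ∧ (ls.foldl (fun (st : Int × Bool) line =>
        if PySem.Str.strip line ≠ "" then (if st.2 then st.1 + 1 else st.1, false)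
        else (st.1, true)) (n, false)).1 = n + (pvBlocks (ls.dropWhile pvNB)).length := by
  induction ls with
  | nil => intro n; simp [pvBlocks]
  | cons l ls ih =>
    intro n
    by_cases h : PySem.Str.strip l = ""
    · have hnb : pvNB l = false := by simp [pvNB, h]
      have step : ∀ (m : Int) (pb : Bool),
          (if PySem.Str.strip l ≠ "" then (if (m, pb).2 = true then (m, pb).1 + 1 else (m, pb).1, false)
           else ((m, pb).1, true)) = (m, true) := by intro m pb; simp [h]
      constructor
      · rw [List.foldl_cons, step, (ih n).1, pvBlocks, if_neg (by simp [hnb])]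
      · rw [List.foldl_cons, step, (ih n).1, List.dropWhile_cons_of_neg (by simp [hnb]),
          pvBlocks, if_neg (by simp [hnb])]
    · have hnb : pvNB l = true := by simp [pvNB, h]
      have stepT : ∀ (m : Int),
          (if PySem.Str.strip l ≠ "" then (if (m, true).2 = true then (m, true).1 + 1 else (m, true).1, false)
           else ((m, true).1, true)) = (m + 1, false) := by intro m; simp [h]
      have stepF : ∀ (m : Int),
          (if PySem.Str.strip l ≠ "" then (if (m, false).2 = true then (m, false).1 + 1 else (m, false).1, false)
           else ((m, false).1, true)) = (m, false) := by intro m; simp [h]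
      constructor
      · rw [List.foldl_cons, stepT, (ih (n + 1)).2, pvBlocks, if_pos hnb]
        simp; ring
      · rw [List.foldl_cons, stepF, (ih n).2, List.dropWhile_cons_of_pos hnb]

-- flattening the blocks gives exactly the non-blank lines
theorem flatten_pvBlocks (ls : List String) : (pvBlocks ls).flatten = ls.filter pvNB := by
  induction ls using pvBlocks.induct with
  | case1 => simp [pvBlocks]
  | case2 l ls h ih =>
    have hsplit : ls.filter pvNB = ls.takeWhile pvNB ++ (ls.dropWhile pvNB).filter pvNB := by
      conv_lhs => rw [← List.takeWhile_append_dropWhile (p := pvNB) (l := ls)]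
      rw [List.filter_append, List.filter_eq_self.mpr (fun a ha => List.mem_takeWhile_imp ha)]
    rw [pvBlocks, if_pos h]
    simp [ih, h, hsplit]
  | case3 l ls h ih =>
    rw [pvBlocks, if_neg h]
    simp only [Bool.not_eq_true] at h
    simp [ih, h]

-- a bullet line is non-blank
theorem bullet_nonblank (l : String) (h : pvBullet l = true) : pvNB l = true := by
  by_contra hnb
  simp only [pvNB, bne_iff_ne, ne_eq, not_not] at hnb
  simp [pvBullet, hnb, PySem.Str.startswith_eq, PySem.Chars.startswith] at h

-- restricting the bullet filter to the non-blank lines loses nothing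
theorem bullet_filter_blocks (ls : List String) :
    (pvBlocks ls).flatten.filter pvBullet = ls.filter pvBullet := by
  rw [flatten_pvBlocks, List.filter_filter]
  apply List.filter_congr
  intro a _
  by_cases h : pvBullet a = true
  · simp [h, bullet_nonblank a h]
  · simp only [Bool.not_eq_true] at h; simp [h]

-- A's bullet fold is a filtered count
theorem bullets_eq (ls : List String) : ∀ (acc : Int),
    (ls.foldl (fun (acc : Int) line =>
        let s := PySem.Str.strip line
        if PySem.Str.startswith s "-" || PySem.Str.startswith s "*" || PySem.Str.startswith s "•"
        then acc + 1 else acc) acc)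
    = acc + ((ls.filter pvBullet).length : Int) := by
  induction ls with
  | nil => intro acc; simp
  | cons l ls ih =>
    intro acc
    rw [List.foldl_cons, List.filter_cons]
    by_cases h : pvBullet l = true
    · have h' : (PySem.Str.startswith (PySem.Str.strip l) "-" || PySem.Str.startswith (PySem.Str.strip l) "*"
          || PySem.Str.startswith (PySem.Str.strip l) "•") = true := by
        simpa [pvBullet] using h
      have e : (let s := PySem.Str.strip l;
          if PySem.Str.startswith s "-" || PySem.Str.startswith s "*" || PySem.Str.startswith s "•"
          then acc + 1 else (acc : Int)) = acc + 1 := by simp only [h', if_true]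
      rw [e, ih (acc + 1), h]
      simp; ring
    · simp only [Bool.not_eq_true] at h
      have h' : (PySem.Str.startswith (PySem.Str.strip l) "-" || PySem.Str.startswith (PySem.Str.strip l) "*"
          || PySem.Str.startswith (PySem.Str.strip l) "•") = false := by
        simpa [pvBullet] using h
      have e : (let s := PySem.Str.strip l;
          if PySem.Str.startswith s "-" || PySem.Str.startswith s "*" || PySem.Str.startswith s "•"
          then acc + 1 else (acc : Int)) = acc := by simp only [h', Bool.false_eq_true, if_false]
      rw [e, ih acc, h]
      simp

-- ===== VERDICT (by name: the statement is the Claim_ definition above) =====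
theorem description_stats_spec : Claim_equal_description_stats := by
  intro description _
  unfold Spec_description_stats
  by_cases h : description = ""
  · subst h; decide
  · unfold description_stats description_stats_alt
    rw [if_neg h]
    simp only [ne_eq, h, not_false_eq_true, if_pos, and_true]
    rw [bullets_eq, ← bullet_filter_blocks, (para_fold_eq (PySem.Str.splitlines description) 0).1]
    simp only [zero_add]
    congr 1
    by_cases hp : (pvBlocks (PySem.Str.splitlines description)).length = 0 <;>
      simp [hp]
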